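-- pv_equiv track=rewrite | github.com/eckertantonia/prog3 | Abgabe/a1.py | html2java
-- ===== SOURCE A (Python) =====
-- def html2java(s):
--     "Ihre Loesung"
--     newS = ""
--     prev = False
--
--     for b in s:
--         if b == "-":
--             prev = True
--             continue
--         elif prev:
--             prev = False
--             newS += b.upper()
--         else:
--             newS += b
--
--     return newS
-- ===== SOURCE B (Python) =====
-- def html2java(s):
--     parts = s.split('-')
--     return parts[0] + ''.join(p[0].upper() + p[1:] if p else '' for p in parts[1:])
-- ===== Notes on version B (the rewrite author's own statement) =====
-- stated objective: idiomatic
-- what changed: Replaced the per-character loop with a hyphen-seen flag by a segment-level pass: split the string on the hyphen separator, keep the first segment, uppercase the first character of each later segment, and join; empty segments from consecutive/leading/trailing hyphens stay empty.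
import Mathlib
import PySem

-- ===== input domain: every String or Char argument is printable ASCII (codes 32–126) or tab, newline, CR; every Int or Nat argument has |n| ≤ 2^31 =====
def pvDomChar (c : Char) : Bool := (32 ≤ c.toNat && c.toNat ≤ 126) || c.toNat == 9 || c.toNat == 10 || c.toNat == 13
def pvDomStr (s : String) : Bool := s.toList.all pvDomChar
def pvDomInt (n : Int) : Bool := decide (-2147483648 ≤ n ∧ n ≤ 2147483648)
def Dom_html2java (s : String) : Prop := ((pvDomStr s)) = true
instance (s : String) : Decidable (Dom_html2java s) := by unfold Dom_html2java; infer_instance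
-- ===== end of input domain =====

-- B replaces A's per-character loop-with-flag by a segment-level pass over split('-') (objective: idiomatic).

-- ===== PORT A =====
-- A: character loop accumulating newS with a 'prev saw hyphen' flag.
def html2javaLoop : List Char → List Char → Bool → List Char
  | [], newS, _ => newS
  | b :: t, newS, prev =>
    if b = '-' then html2javaLoop t newS true
    else if prev then html2javaLoop t (newS ++ [PySem.Chars.upperChar b]) false
    else html2javaLoop t (newS ++ [b]) false

def html2java (s : String) : String := String.ofList (html2javaLoop s.toList [] false)

-- ===== PORT B =====
-- p[0].upper() + p[1:] for a nonempty segment, '' for an empty one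
def pvCapSeg (p : List Char) : List Char :=
  match p with
  | [] => []
  | c :: t => PySem.Chars.upperChar c :: t

-- B: split on '-', keep parts[0], capitalize the first char of each later segment, join.
def html2java_alt (s : String) : String :=
  match s.toList.splitOn '-' with
  | [] => ""   -- unreachable: split always returns at least one segment
  | p0 :: rest => String.ofList (p0 ++ (rest.map pvCapSeg).flatten)

-- ===== PRECONDITION & SPEC =====
def Spec_html2java (s : String) (out : String) : Prop := out = html2java_alt s
instance (s : String) (out : String) : Decidable (Spec_html2java s out) := by unfold Spec_html2java; infer_instance

-- ===== CLAIM (what is proved, stated in full; the proofs are below) =====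
def Claim_equal_html2java : Prop := ∀ (s : String), Dom_html2java s → Spec_html2java s (html2java s)

-- ===== LEMMAS AND PROOFS =====

lemma html2javaLoop_splitOn (l : List Char) : ∀ (acc : List Char),
    (html2javaLoop l acc false =
      acc ++ (List.splitOnP (fun x => x == '-') l).headI ++
        ((List.splitOnP (fun x => x == '-') l).tail.map pvCapSeg).flatten) ∧
    (html2javaLoop l acc true =
      acc ++ pvCapSeg ((List.splitOnP (fun x => x == '-') l).headI) ++
        ((List.splitOnP (fun x => x == '-') l).tail.map pvCapSeg).flatten) := by
  induction l with
  | nil =>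
      intro acc
      simp [html2javaLoop, List.splitOnP_nil, pvCapSeg]
  | cons c t ih =>
      intro acc
      obtain ⟨q0, qs, hq⟩ := List.exists_cons_of_ne_nil (List.splitOnP_ne_nil (fun x => x == '-') t)
      by_cases hc : c = '-'
      · subst hc
        constructor <;>
          · simp only [html2javaLoop, List.splitOnP_cons, hq]
            simp only [show (('-' : Char) == '-') = true from rfl]
            have h2 := (ih acc).2
            rw [hq] at h2
            simp [h2, pvCapSeg]
      · have hcb : ((c == '-') = false) := by simp [hc]
        constructor
        · have h1 := (ih (acc ++ [c])).1
          rw [hq] at h1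
          simp [html2javaLoop, hc, List.splitOnP_cons, hcb, hq, h1]
        · have h1 := (ih (acc ++ [PySem.Chars.upperChar c])).1
          rw [hq] at h1
          simp [html2javaLoop, hc, List.splitOnP_cons, hcb, hq, h1, pvCapSeg]

-- ===== VERDICT (by name: the statement is the Claim_ definition above) =====
theorem html2java_spec : Claim_equal_html2java := by
  intro s _
  unfold Spec_html2java html2java html2java_alt
  obtain ⟨p0, rest, hp⟩ :=
    List.exists_cons_of_ne_nil (List.splitOnP_ne_nil (fun x => x == '-') s.toList)
  have h := (html2javaLoop_splitOn s.toList []).1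
  rw [hp] at h
  simp only [List.splitOn] at *
  rw [hp]
  simp at h
  simp [h]
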